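-- pv_equiv track=rewrite | github.com/FarhanSabit-OITS/labaidgpt-main | updated_cancer_streamlit_integration.py | calculate_overall_risk_level
-- ===== SOURCE A (Python) =====
-- def calculate_overall_risk_level(factors_analysis):
--     """Calculate overall risk level based on individual factors"""
--
--     protective_count = sum(1 for f in factors_analysis if f["risk_level"] == "protective")
--     neutral_count = sum(1 for f in factors_analysis if f["risk_level"] == "neutral")
--     mild_risk_count = sum(1 for f in factors_analysis if f["risk_level"] == "mild_risk")
--     risk_count = sum(1 for f in factors_analysis if f["risk_level"] == "risk")
--     high_risk_count = sum(1 for f in factors_analysis if f["risk_level"] == "high_risk")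
--
--     # Weighted scoring
--     score = (protective_count * -2) + (neutral_count * 0) + (mild_risk_count * 1) + (risk_count * 2) + (high_risk_count * 3)
--
--     if score <= -4:
--         return "very_low"
--     elif score <= -1:
--         return "low"
--     elif score <= 2:
--         return "moderate"
--     elif score <= 5:
--         return "high"
--     else:
--         return "very_high"
-- ===== SOURCE B (Python) =====
-- def calculate_overall_risk_level(factors_analysis):
--     """Calculate overall risk level based on individual factors"""
--     weights = {"protective": -2, "neutral": 0, "mild_risk": 1, "risk": 2, "high_risk": 3}
--     score = 0
--     for f in factors_analysis:
--         score += weights.get(f["risk_level"], 0)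
--     if score <= -4:
--         return "very_low"
--     elif score <= -1:
--         return "low"
--     elif score <= 2:
--         return "moderate"
--     elif score <= 5:
--         return "high"
--     else:
--         return "very_high"
-- ===== Notes on version B (the rewrite author's own statement) =====
-- stated objective: simpler
-- what changed: Replaces five separate counting passes plus a weighted-sum formula by a weight table and one accumulating pass over factors_analysis.
import Mathlib
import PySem

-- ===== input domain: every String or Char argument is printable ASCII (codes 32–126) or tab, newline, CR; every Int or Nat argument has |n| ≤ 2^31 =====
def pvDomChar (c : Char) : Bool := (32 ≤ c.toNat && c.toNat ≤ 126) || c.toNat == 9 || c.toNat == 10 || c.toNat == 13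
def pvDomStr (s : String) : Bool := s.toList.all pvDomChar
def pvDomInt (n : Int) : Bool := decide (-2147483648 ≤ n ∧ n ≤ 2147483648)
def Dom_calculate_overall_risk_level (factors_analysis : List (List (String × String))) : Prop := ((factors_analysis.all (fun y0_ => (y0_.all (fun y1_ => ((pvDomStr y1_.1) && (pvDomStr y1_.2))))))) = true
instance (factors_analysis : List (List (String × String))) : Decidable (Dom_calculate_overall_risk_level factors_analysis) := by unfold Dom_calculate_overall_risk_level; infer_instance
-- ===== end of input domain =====

-- B replaces A's five separate counting passes and weighted-sum formula by a weight table and one accumulating pass (simpler decomposition; same thresholds).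


-- ===== PORT A =====
-- A computes five counts by separate passes, then a weighted score, then thresholds.
def calculate_overall_risk_level (factors_analysis : List (List (String × String))) : String :=
  let protective_count : Int := (factors_analysis.countP (fun f => f.lookup "risk_level" == some "protective") : Int)
  let neutral_count : Int := (factors_analysis.countP (fun f => f.lookup "risk_level" == some "neutral") : Int)
  let mild_risk_count : Int := (factors_analysis.countP (fun f => f.lookup "risk_level" == some "mild_risk") : Int)
  let risk_count : Int := (factors_analysis.countP (fun f => f.lookup "risk_level" == some "risk") : Int)
  let high_risk_count : Int := (factors_analysis.countP (fun f => f.lookup "risk_level" == some "high_risk") : Int)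
  let score : Int := (protective_count * -2) + (neutral_count * 0) + (mild_risk_count * 1) + (risk_count * 2) + (high_risk_count * 3)
  if score ≤ -4 then "very_low"
  else if score ≤ -1 then "low"
  else if score ≤ 2 then "moderate"
  else if score ≤ 5 then "high"
  else "very_high"

-- ===== PORT B =====
-- B: a weight table and ONE accumulating pass.
def pvWeights : List (String × Int) :=
  [("protective", -2), ("neutral", 0), ("mild_risk", 1), ("risk", 2), ("high_risk", 3)]

-- weights.get(f["risk_level"], 0); under Pre_ the "risk_level" key is present (KeyError otherwise).
def pvWeightOf (f : List (String × String)) : Int :=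
  (pvWeights.lookup ((f.lookup "risk_level").getD "")).getD 0

def calculate_overall_risk_level_alt (factors_analysis : List (List (String × String))) : String :=
  let score : Int := factors_analysis.foldl (fun s f => s + pvWeightOf f) 0
  if score ≤ -4 then "very_low"
  else if score ≤ -1 then "low"
  else if score ≤ 2 then "moderate"
  else if score ≤ 5 then "high"
  else "very_high"

-- ===== PRECONDITION & SPEC =====
-- Pre_ excludes exactly the inputs where some factor lacks the "risk_level" key: there
-- both Pythons raise KeyError (f["risk_level"]).
def Pre_calculate_overall_risk_level (factors_analysis : List (List (String × String))) : Prop :=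
  (factors_analysis.all (fun f => f.any (fun p => p.1 == "risk_level"))) = true
instance (factors_analysis : List (List (String × String))) : Decidable (Pre_calculate_overall_risk_level factors_analysis) := by unfold Pre_calculate_overall_risk_level; infer_instance
def pvWitness_calculate_overall_risk_level : (List (List (String × String))) :=
  [[("risk_level", "risk")], [("risk_level", "protective"), ("name", "x")]]

def Spec_calculate_overall_risk_level (factors_analysis : List (List (String × String))) (out : String) : Prop := out = calculate_overall_risk_level_alt factors_analysis
instance (factors_analysis : List (List (String × String))) (out : String) : Decidable (Spec_calculate_overall_risk_level factors_analysis out) := by unfold Spec_calculate_overall_risk_level; infer_instance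

-- ===== CLAIM (what is proved, stated in full; the proofs are below) =====
def Claim_equal_calculate_overall_risk_level : Prop := ∀ (factors_analysis : List (List (String × String))), Dom_calculate_overall_risk_level factors_analysis → Pre_calculate_overall_risk_level factors_analysis → Spec_calculate_overall_risk_level factors_analysis (calculate_overall_risk_level factors_analysis)

-- ===== LEMMAS AND PROOFS =====

-- pointwise: B's table weight decomposes into A's per-level indicator weights
theorem pvWeightOf_eq (f : List (String × String)) :
    pvWeightOf f =
      (if f.lookup "risk_level" == some "protective" then (-2 : Int) else 0)
      + (if f.lookup "risk_level" == some "mild_risk" then 1 else 0)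
      + (if f.lookup "risk_level" == some "risk" then 2 else 0)
      + (if f.lookup "risk_level" == some "high_risk" then 3 else 0) := by
  unfold pvWeightOf pvWeights
  rcases h : f.lookup "risk_level" with _ | s
  · decide
  · by_cases h1 : s = "protective"
    · subst h1; decide
    by_cases h2 : s = "neutral"
    · subst h2; decide
    by_cases h3 : s = "mild_risk"
    · subst h3; decide
    by_cases h4 : s = "risk"
    · subst h4; decide
    by_cases h5 : s = "high_risk"
    · subst h5; decide
    have e1 : (s == "protective") = false := by simp [h1]
    have e2 : (s == "neutral") = false := by simp [h2]
    have e3 : (s == "mild_risk") = false := by simp [h3]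
    have e4 : (s == "risk") = false := by simp [h4]
    have e5 : (s == "high_risk") = false := by simp [h5]
    simp [List.lookup, e1, e2, e3, e4, e5]

theorem pvScore_eq (l : List (List (String × String))) (a : Int) :
    l.foldl (fun s f => s + pvWeightOf f) a =
      a + ((l.countP (fun f => f.lookup "risk_level" == some "protective") : Int) * -2)
        + ((l.countP (fun f => f.lookup "risk_level" == some "mild_risk") : Int) * 1)
        + ((l.countP (fun f => f.lookup "risk_level" == some "risk") : Int) * 2)
        + ((l.countP (fun f => f.lookup "risk_level" == some "high_risk") : Int) * 3) := by
  induction l generalizing a with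
  | nil => simp
  | cons f t ih =>
    simp only [List.foldl_cons, List.countP_cons]
    rw [ih, pvWeightOf_eq f]
    split_ifs <;> push_cast <;> ring

-- ===== VERDICT (by name: the statement is the Claim_ definition above) =====
theorem calculate_overall_risk_level_spec : Claim_equal_calculate_overall_risk_level := by
  intro fa _ _
  unfold Spec_calculate_overall_risk_level calculate_overall_risk_level calculate_overall_risk_level_alt
  rw [pvScore_eq fa 0]
  ring_nf
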